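-- pv_equiv track=rewrite | github.com/majoporse/uni | ib111/05/p5_doctor.py | missing_visits
-- ===== SOURCE A (Python) =====
-- from typing import List, Tuple
--
-- def missing_visits(year: int, patients: List[Tuple[int, List[Tuple[int, int, int, int]]]]) -> List[int]:
--     skippers = []
--     for i in range(len(patients)):
--         current_year = 0
--         for j in range(len(patients[i][1])):
--             if patients[i][1][j][0] > year:
--                 current_year = patients[i][1][j][0]
--                 break
--             else:
--                 current_year = patients[i][1][j][0]
--         if current_year <= year:
--             skippers.append(patients[i][0])
--     return skippers
-- ===== SOURCE B (Python) =====
-- def missing_visits(year, patients):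
--     latest = {}
--     for i, (_, visits) in enumerate(patients):
--         for v in visits:
--             if i not in latest or latest[i] < v[0]:
--                 latest[i] = v[0]
--     return [pid for i, (pid, _) in enumerate(patients) if latest.get(i, 0) <= year]
-- ===== Notes on version B (the rewrite author's own statement) =====
-- stated objective: alternative
-- what changed: Instead of A's per-patient break-scan with a running variable and immediate append, B runs two staged passes: a first pass builds a dict mapping patient index to its latest (maximum) visit year, then a second pass emits patient ids by a threshold lookup in that dict (default 0 for no visits).
import Mathlib
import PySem

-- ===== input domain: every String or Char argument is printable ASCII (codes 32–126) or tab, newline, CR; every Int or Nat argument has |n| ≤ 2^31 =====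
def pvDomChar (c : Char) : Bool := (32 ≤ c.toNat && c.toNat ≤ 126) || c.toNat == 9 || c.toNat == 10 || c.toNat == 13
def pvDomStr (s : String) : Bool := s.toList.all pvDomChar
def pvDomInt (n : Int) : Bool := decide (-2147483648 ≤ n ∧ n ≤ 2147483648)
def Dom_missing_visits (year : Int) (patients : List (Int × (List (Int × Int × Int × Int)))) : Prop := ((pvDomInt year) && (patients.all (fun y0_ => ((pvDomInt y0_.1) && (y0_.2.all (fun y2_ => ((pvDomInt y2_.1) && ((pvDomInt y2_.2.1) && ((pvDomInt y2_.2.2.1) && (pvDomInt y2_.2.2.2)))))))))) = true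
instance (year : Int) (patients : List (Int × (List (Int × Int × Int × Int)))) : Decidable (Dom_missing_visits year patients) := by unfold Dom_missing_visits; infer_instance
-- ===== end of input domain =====

-- B replaces A's break-scan-and-append loop by two staged passes: a dict index→latest visit year, then a threshold-lookup filter; objective: alternative.


-- ===== PORT A =====
-- inner index loop with break: cur starts at 0, is set to each visit's year, stops at the first year > `year`
def pvInnerA (year : Int) (cur : Int) (visits : List (Int × Int × Int × Int)) : Int :=
  match visits with
  | [] => cur
  | v :: rest => if v.1 > year then v.1 else pvInnerA year v.1 rest

def missing_visits (year : Int) (patients : List (Int × (List (Int × Int × Int × Int)))) : List Int :=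
  patients.foldl (fun skippers p =>
    let cur := pvInnerA year 0 p.2
    if cur ≤ year then skippers ++ [p.1] else skippers) []

-- ===== PORT B =====
-- pass 1: `if i not in latest or latest[i] < v[0]: latest[i] = v[0]` over all (i, patient) of enumerate(patients)
def pvBuildLatest (patients : List (Int × (List (Int × Int × Int × Int)))) : PySem.Dict Int Int :=
  (PySem.List.enumerate patients 0).foldl (fun d ip =>
    ip.2.2.foldl (fun d v =>
      if !(d.contains ip.1) || decide (d.getD ip.1 0 < v.1) then d.insert ip.1 v.1 else d) d)
    PySem.Dict.empty

-- pass 2: [pid for i, (pid, _) in enumerate(patients) if latest.get(i, 0) <= year]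
def missing_visits_alt (year : Int) (patients : List (Int × (List (Int × Int × Int × Int)))) : List Int :=
  let latest := pvBuildLatest patients
  (PySem.List.enumerate patients 0).filterMap (fun ip =>
    if latest.getD ip.1 0 ≤ year then some ip.2.1 else none)

-- ===== PRECONDITION & SPEC =====
def Spec_missing_visits (year : Int) (patients : List (Int × (List (Int × Int × Int × Int)))) (out : List Int) : Prop := out = missing_visits_alt year patients
instance (year : Int) (patients : List (Int × (List (Int × Int × Int × Int)))) (out : List Int) : Decidable (Spec_missing_visits year patients out) := by unfold Spec_missing_visits; infer_instance

-- ===== CLAIM (what is proved, stated in full; the proofs are below) =====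
def Claim_equal_missing_visits : Prop := ∀ (year : Int) (patients : List (Int × (List (Int × Int × Int × Int)))), Dom_missing_visits year patients → Spec_missing_visits year patients (missing_visits year patients)

-- ===== LEMMAS AND PROOFS =====

-- the per-patient inner loop of B's first pass
def pvInnerB (i : Int) (d : PySem.Dict Int Int) (visits : List (Int × Int × Int × Int)) : PySem.Dict Int Int :=
  visits.foldl (fun d v =>
    if !(d.contains i) || decide (d.getD i 0 < v.1) then d.insert i v.1 else d) d

-- the value tracked at key i, as an Option fold
def pvOptMax (o : Option Int) (visits : List (Int × Int × Int × Int)) : Option Int :=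
  visits.foldl (fun o v => match o with
    | none => some v.1
    | some m => if m < v.1 then some v.1 else some m) o

-- "max visit year, default 0"
def pvMaxYear (visits : List (Int × Int × Int × Int)) : Int :=
  ((visits.map (fun v => v.1)).max?).getD 0

theorem pvInnerB_get?_ne (i j : Int) (hne : j ≠ i) :
    ∀ (visits : List (Int × Int × Int × Int)) (d : PySem.Dict Int Int),
      (pvInnerB i d visits).get? j = d.get? j := by
  intro visits
  induction visits with
  | nil => intro d; rfl
  | cons v rest ih =>
    intro d
    simp only [pvInnerB, List.foldl_cons]
    by_cases h : (!(d.contains i) || decide (d.getD i 0 < v.1)) = true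
    · rw [if_pos h]
      have := ih (d.insert i v.1)
      simp only [pvInnerB] at this
      rw [this, PySem.Dict.get?_insert_of_ne _ _ hne]
    · rw [if_neg h]; exact ih d

theorem pvInnerB_get?_self (i : Int) :
    ∀ (visits : List (Int × Int × Int × Int)) (d : PySem.Dict Int Int),
      (pvInnerB i d visits).get? i = pvOptMax (d.get? i) visits := by
  intro visits
  induction visits with
  | nil => intro d; rfl
  | cons v rest ih =>
    intro d
    simp only [pvInnerB, pvOptMax, List.foldl_cons]
    rcases hg : d.get? i with _ | m
    · have hc : d.contains i = false := by
        rw [PySem.Dict.contains_eq_isSome_get?, hg]; rfl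
      rw [if_pos (by simp [hc])]
      have := ih (d.insert i v.1)
      simp only [pvInnerB, pvOptMax] at this
      rw [this, PySem.Dict.get?_insert_self]
    · have hc : d.contains i = true := by
        rw [PySem.Dict.contains_eq_isSome_get?, hg]; rfl
      have hgd : d.getD i 0 = m := PySem.Dict.getD_of_get?_eq_some _ _ hg
      by_cases hlt : m < v.1
      · rw [if_pos (by simp [hc, hgd, hlt])]
        have := ih (d.insert i v.1)
        simp only [pvInnerB, pvOptMax] at this
        rw [this, PySem.Dict.get?_insert_self]
        simp [hlt]
      · rw [if_neg (by simp [hc, hgd, hlt])]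
        have := ih d
        simp only [pvInnerB, pvOptMax] at this
        rw [this, hg]
        simp [hlt]

-- the option fold from none computes max? of the mapped years
theorem pvOptMax_some (a : Int) :
    ∀ (visits : List (Int × Int × Int × Int)),
      pvOptMax (some a) visits = some ((visits.map (fun v => v.1)).foldl max a) := by
  intro visits
  induction visits generalizing a with
  | nil => rfl
  | cons v rest ih =>
    simp only [pvOptMax, List.foldl_cons, List.map_cons] at *
    have hmax : (if a < v.1 then some v.1 else some a) = some (max a v.1) := by
      split_ifs with h <;> congr 1 <;> omega
    rw [hmax]
    exact ih (max a v.1)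

theorem pvOptMax_none (visits : List (Int × Int × Int × Int)) :
    (pvOptMax none visits).getD 0 = pvMaxYear visits := by
  cases visits with
  | nil => rfl
  | cons v rest =>
    simp only [pvOptMax, List.foldl_cons]
    have := pvOptMax_some v.1 rest
    simp only [pvOptMax] at this
    rw [this]
    simp only [pvMaxYear, List.map_cons, List.max?_cons', Option.getD_some]

-- outer fold: keys not in the processed list are untouched
theorem pvOuter_get?_not_mem (i : Int) :
    ∀ (l : List (Int × (Int × List (Int × Int × Int × Int)))) (d : PySem.Dict Int Int),
      (∀ ip ∈ l, ip.1 ≠ i) →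
      (l.foldl (fun d ip => pvInnerB ip.1 d ip.2.2) d).get? i = d.get? i := by
  intro l
  induction l with
  | nil => intro d _; rfl
  | cons ip rest ih =>
    intro d h
    simp only [List.foldl_cons]
    rw [ih _ (fun q hq => h q (List.mem_cons_of_mem _ hq))]
    exact pvInnerB_get?_ne ip.1 i (fun he => h ip List.mem_cons_self he.symm) ip.2.2 d

-- outer fold: each listed key ends at the max of its own visits (keys pairwise distinct, initially absent)
theorem pvOuter_get?_mem :
    ∀ (l : List (Int × (Int × List (Int × Int × Int × Int)))) (d : PySem.Dict Int Int),
      (l.map Prod.fst).Nodup →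
      (∀ ip ∈ l, d.get? ip.1 = none) →
      ∀ ip ∈ l,
        (l.foldl (fun d ip => pvInnerB ip.1 d ip.2.2) d).get? ip.1 = pvOptMax none ip.2.2 := by
  intro l
  induction l with
  | nil => intro d _ _ ip h; simp at h
  | cons q rest ih =>
    intro d hnd hnone ip hip
    simp only [List.map_cons, List.nodup_cons] at hnd
    simp only [List.foldl_cons]
    rcases List.mem_cons.mp hip with rfl | hmem
    · rw [pvOuter_get?_not_mem ip.1 rest (pvInnerB ip.1 d ip.2.2)
        (fun r hr he => hnd.1 (he ▸ List.mem_map_of_mem hr))]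
      rw [pvInnerB_get?_self, hnone ip List.mem_cons_self]
    · exact ih (pvInnerB q.1 d q.2.2) hnd.2
        (fun r hr => by
          rw [pvInnerB_get?_ne q.1 r.1
            (fun he => hnd.1 (he ▸ List.mem_map_of_mem hr)) q.2.2 d]
          exact hnone r (List.mem_cons_of_mem _ hr))
        ip hmem

-- fst components of enumerate are pairwise distinct
theorem pvEnum_fst_nodup (patients : List (Int × (List (Int × Int × Int × Int)))) (s : Int) :
    ((PySem.List.enumerate patients s).map Prod.fst).Nodup := by
  have h := PySem.List.pairwise_lt_enumerate patients s
  have h2 : ((PySem.List.enumerate patients s).map Prod.fst).Pairwise (· < ·) :=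
    (List.pairwise_map).mpr h
  exact h2.imp (fun hlt => by omega)

-- the final dict looks up to pvMaxYear on every enumerated index
theorem pvBuildLatest_getD (patients : List (Int × (List (Int × Int × Int × Int)))) :
    ∀ ip ∈ PySem.List.enumerate patients 0,
      (pvBuildLatest patients).getD ip.1 0 = pvMaxYear ip.2.2 := by
  intro ip hip
  unfold pvBuildLatest
  simp only [← pvInnerB.eq_1]
  rw [PySem.Dict.getD_eq_get?_getD]
  rw [pvOuter_get?_mem (PySem.List.enumerate patients 0) PySem.Dict.empty
    (pvEnum_fst_nodup patients 0) (fun _ _ => PySem.Dict.get?_empty _) ip hip]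
  exact pvOptMax_none ip.2.2

-- A's break-scan ends ≤ year iff every visit year is ≤ year (for nonempty visits, independent of cur)
theorem pvInnerA_le_iff (year : Int) :
    ∀ (visits : List (Int × Int × Int × Int)) (cur : Int), visits ≠ [] →
      (pvInnerA year cur visits ≤ year ↔ ∀ v ∈ visits, v.1 ≤ year) := by
  intro visits
  induction visits with
  | nil => intro cur h; exact absurd rfl h
  | cons v rest ih =>
    intro cur _
    simp only [pvInnerA]
    by_cases hv : v.1 > year
    · rw [if_pos hv]
      exact ⟨fun h => absurd h (by omega),
             fun h => absurd (h v (List.mem_cons_self)) (by omega)⟩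
    · rw [if_neg hv]
      cases rest with
      | nil =>
        simp only [pvInnerA, List.mem_cons]
        constructor
        · intro h x hx; rcases hx with hx | hx
          · subst hx; exact h
          · simp at hx
        · intro h; exact h v (Or.inl rfl)
      | cons w r =>
        rw [ih v.1 (by simp)]
        constructor
        · intro h x hx
          rcases List.mem_cons.mp hx with hx | hx
          · subst hx; omega
          · exact h x hx
        · intro h x hx; exact h x (List.mem_cons_of_mem _ hx)

theorem pvMaxYear_le_iff (year : Int) (visits : List (Int × Int × Int × Int)) (h : visits ≠ []) :
    (pvMaxYear visits ≤ year ↔ ∀ v ∈ visits, v.1 ≤ year) := by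
  unfold pvMaxYear
  rcases hm : (visits.map (fun v => v.1)).max? with _ | m
  · have h0 := List.max?_eq_none_iff.mp hm
    rw [List.map_eq_nil_iff] at h0
    exact absurd h0 h
  · rw [hm, Option.getD_some]
    rw [List.max?_eq_some_iff] at hm
    constructor
    · intro hle v hv
      have := hm.2 v.1 (List.mem_map.mpr ⟨v, hv, rfl⟩)
      omega
    · intro hall
      rcases List.mem_map.mp hm.1 with ⟨v, hv, rfl⟩
      exact hall v hv

theorem pvPatient_iff (year : Int) (visits : List (Int × Int × Int × Int)) :
    (pvInnerA year 0 visits ≤ year ↔ pvMaxYear visits ≤ year) := by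
  cases visits with
  | nil => simp [pvInnerA, pvMaxYear]
  | cons v rest =>
    rw [pvInnerA_le_iff year _ 0 (by simp), pvMaxYear_le_iff year _ (by simp)]

-- A's foldl-append loop as a filterMap on the pvMaxYear test
theorem pvFoldl_eq (year : Int) :
    ∀ (patients : List (Int × (List (Int × Int × Int × Int)))) (acc : List Int),
      patients.foldl (fun skippers p =>
        let cur := pvInnerA year 0 p.2
        if cur ≤ year then skippers ++ [p.1] else skippers) acc
        = acc ++ patients.filterMap (fun p => if pvMaxYear p.2 ≤ year then some p.1 else none) := by
  intro patients
  induction patients with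
  | nil => simp
  | cons p rest ih =>
    intro acc
    simp only [List.foldl_cons, List.filterMap_cons]
    by_cases h : pvInnerA year 0 p.2 ≤ year
    · have h' : pvMaxYear p.2 ≤ year := (pvPatient_iff year p.2).mp h
      simp [h, h', ih]
    · have h' : ¬ pvMaxYear p.2 ≤ year := fun hc => h ((pvPatient_iff year p.2).mpr hc)
      simp [h, h', ih]

-- B's second pass as a filterMap on the pvMaxYear test, given the dict lookups
theorem pvFilter_eq (year : Int) (latest : PySem.Dict Int Int) :
    ∀ (patients : List (Int × (List (Int × Int × Int × Int)))) (s : Int),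
      (∀ ip ∈ PySem.List.enumerate patients s, latest.getD ip.1 0 = pvMaxYear ip.2.2) →
      (PySem.List.enumerate patients s).filterMap (fun ip =>
        if latest.getD ip.1 0 ≤ year then some ip.2.1 else none)
        = patients.filterMap (fun p => if pvMaxYear p.2 ≤ year then some p.1 else none) := by
  intro patients
  induction patients with
  | nil => intro s _; simp [PySem.List.enumerate_nil]
  | cons p rest ih =>
    intro s h
    rw [PySem.List.enumerate_cons]
    simp only [List.filterMap_cons]
    have hp := h (s, p) (by rw [PySem.List.enumerate_cons]; exact List.mem_cons_self)
    simp only at hp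
    rw [hp]
    rw [ih (s + 1) (fun ip hip => h ip (by rw [PySem.List.enumerate_cons]; exact List.mem_cons_of_mem _ hip))]

-- ===== VERDICT (by name: the statement is the Claim_ definition above) =====
theorem missing_visits_spec : Claim_equal_missing_visits := by
  intro year patients _
  unfold Spec_missing_visits missing_visits missing_visits_alt
  rw [pvFoldl_eq year patients [], List.nil_append]
  rw [pvFilter_eq year (pvBuildLatest patients) patients 0 (pvBuildLatest_getD patients)]
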